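-- pv_equiv track=rewrite | github.com/rupertbg/aws-tag-policy-to-service-control-policy | index.py | add_tag_conditions_to_resource_map
-- ===== SOURCE A (Python) =====
-- def add_tag_conditions_to_resource_map(tag_name, tag_statement, resource_map):
--     inheritance_operators = ["@@assign", "@@append"]
--     for io in inheritance_operators:
--         if io in tag_statement["enforced_for"]:
--             for resource in tag_statement["enforced_for"][io]:
--                 if resource in resource_map.keys():
--                     if "Condition" not in resource_map[resource]:
--                         resource_map[resource]["Condition"] = {
--                             "Null": {}}
--                     resource_map[resource]["Condition"][
--                         "Null"][f"aws:RequestTag/{tag_name}"] = "true"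
--                 elif resource.endswith(':*'):
--                     wildcard_resources = [r for r in resource_map.keys(
--                     ) if r.startswith(resource.split(':')[0])]
--                     for wildcard_resource in wildcard_resources:
--                         if "Condition" not in resource_map[wildcard_resource]:
--                             resource_map[wildcard_resource]["Condition"] = {
--                                 "Null": {}}
--                         resource_map[wildcard_resource]["Condition"][
--                             "Null"][f"aws:RequestTag/{tag_name}"] = "true"
--     return resource_map
-- ===== SOURCE B (Python) =====
-- def add_tag_conditions_to_resource_map(tag_name, tag_statement, resource_map):
--     # Pass 1: decide which map keys are targeted (direct match wins over the
--     # wildcard branch, as in the elif), collecting exact keys and wildcard prefixes.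
--     enforced = tag_statement["enforced_for"]
--     exact = set()
--     prefixes = []
--     for io in ("@@assign", "@@append"):
--         for resource in enforced.get(io, []):
--             if resource in resource_map:
--                 exact.add(resource)
--             elif resource.endswith(':*'):
--                 prefixes.append(resource.split(':')[0])
--     # Pass 2: one sweep over the map, applying the single shared mutation.
--     cond_key = f"aws:RequestTag/{tag_name}"
--     for key, entry in resource_map.items():
--         if key in exact or any(key.startswith(p) for p in prefixes):
--             entry.setdefault("Condition", {"Null": {}})["Null"][cond_key] = "true"
--     return resource_map
-- ===== Notes on version B (the rewrite author's own statement) =====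
-- stated objective: simpler
-- what changed: Instead of mutating the map inside nested scans with a triplicated mutation block, B first collects the exact-match keys and wildcard prefixes from enforced_for, then makes one sweep over resource_map applying a single shared Null-condition mutation to each targeted entry.
import Mathlib
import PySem

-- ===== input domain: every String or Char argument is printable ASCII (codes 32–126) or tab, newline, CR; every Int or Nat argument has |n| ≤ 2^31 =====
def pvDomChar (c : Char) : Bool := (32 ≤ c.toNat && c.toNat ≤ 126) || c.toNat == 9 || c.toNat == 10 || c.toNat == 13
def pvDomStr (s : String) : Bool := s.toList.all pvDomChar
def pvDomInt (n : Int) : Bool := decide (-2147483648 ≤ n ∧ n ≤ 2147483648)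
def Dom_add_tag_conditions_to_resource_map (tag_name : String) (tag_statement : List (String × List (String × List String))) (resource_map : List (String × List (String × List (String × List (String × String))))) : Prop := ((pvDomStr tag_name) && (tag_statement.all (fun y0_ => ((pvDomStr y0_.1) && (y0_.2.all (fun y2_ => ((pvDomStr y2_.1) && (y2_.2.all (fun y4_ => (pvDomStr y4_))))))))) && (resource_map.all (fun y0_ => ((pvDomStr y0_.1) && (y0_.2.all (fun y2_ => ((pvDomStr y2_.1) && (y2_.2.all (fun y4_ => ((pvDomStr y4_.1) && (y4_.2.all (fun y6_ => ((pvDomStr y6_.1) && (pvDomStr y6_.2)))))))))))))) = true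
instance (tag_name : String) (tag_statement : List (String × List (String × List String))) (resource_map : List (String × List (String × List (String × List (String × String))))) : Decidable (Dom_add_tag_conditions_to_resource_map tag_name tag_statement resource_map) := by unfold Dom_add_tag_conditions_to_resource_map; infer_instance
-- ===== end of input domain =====

-- B replaces A's nested mutate-as-you-scan loops (with a triplicated mutation block) by one
-- collect-targets pass followed by one sweep over the map applying a single shared mutation
-- (objective: simpler).  Both Pythons mutate resource_map in place in the same way; the
-- equivalence proved here is about the returned value.

-- an entry of the resource map: a dict  str -> dict str -> dict str -> str
abbrev PvEntry : Type := List (String × List (String × List (String × String)))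

-- ===== PORT A =====
-- the mutation block A repeats verbatim in both branches: add {"Null": {}} under "Condition"
-- when missing, then set Condition.Null."aws:RequestTag/<tag_name>" = "true"
def pvA_touch (tag_name : String) (e : PvEntry) : PvEntry :=
  let d := PySem.Dict.mk e
  let d := if d.contains "Condition" then d else d.insert "Condition" [("Null", [])]
  (d.modify "Condition" [] (fun c =>
    ((PySem.Dict.mk c).modify "Null" [] (fun n =>
      ((PySem.Dict.mk n).insert ("aws:RequestTag/" ++ tag_name) "true").items)).items)).items

def add_tag_conditions_to_resource_map (tag_name : String) (tag_statement : List (String × List (String × List String))) (resource_map : List (String × List (String × List (String × List (String × String))))) : List (String × List (String × List (String × List (String × String)))) :=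
  let inheritance_operators := ["@@assign", "@@append"]
  (inheritance_operators.foldl (fun (m : PySem.Dict String PvEntry) io =>
    let enforced := PySem.Dict.mk (((PySem.Dict.mk tag_statement).get? "enforced_for").getD [])
    if enforced.contains io then
      ((enforced.get? io).getD []).foldl (fun m resource =>
        if m.contains resource then
          m.modify resource [] (pvA_touch tag_name)
        else if PySem.Str.endswith resource ":*" then
          (m.keys.filter (fun w => PySem.Str.startswith w (((PySem.Str.split? resource ":").getD []).headD ""))).foldl
            (fun m w => m.modify w [] (pvA_touch tag_name)) m
        else m) m
    else m) (PySem.Dict.mk resource_map)).items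

-- ===== PORT B =====
-- B's single shared mutation (entry.setdefault("Condition", {"Null": {}})["Null"][cond_key] = "true")
def pvB_setNull (cond_key : String) (e : PvEntry) : PvEntry :=
  let d := (PySem.Dict.mk e).setdefault "Condition" [("Null", [])]
  (d.modify "Condition" [] (fun c =>
    ((PySem.Dict.mk c).modify "Null" [] (fun n =>
      ((PySem.Dict.mk n).insert cond_key "true").items)).items)).items

def add_tag_conditions_to_resource_map_alt (tag_name : String) (tag_statement : List (String × List (String × List String))) (resource_map : List (String × List (String × List (String × List (String × String))))) : List (String × List (String × List (String × List (String × String)))) :=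
  let enforced := PySem.Dict.mk (((PySem.Dict.mk tag_statement).get? "enforced_for").getD [])
  -- pass 1: collect exact-match keys (a set) and wildcard prefixes (a list)
  let collected := ["@@assign", "@@append"].foldl (fun (acc : PySem.Set String × List String) io =>
      (enforced.getD io []).foldl (fun (acc : PySem.Set String × List String) resource =>
        if (PySem.Dict.mk resource_map).contains resource then (PySem.Set.add acc.1 resource, acc.2)
        else if PySem.Str.endswith resource ":*" then
          (acc.1, acc.2 ++ [((PySem.Str.split? resource ":").getD []).headD ""])
        else acc) acc) (PySem.Set.empty, [])
  let cond_key := "aws:RequestTag/" ++ tag_name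
  -- pass 2: one sweep over the map
  resource_map.map (fun p =>
    if PySem.Set.contains collected.1 p.1 || collected.2.any (fun q => PySem.Str.startswith p.1 q) then
      (p.1, pvB_setNull cond_key p.2)
    else p)

-- ===== PRECONDITION & SPEC =====
-- closed-form helpers for the precondition: the prefix of a resource pattern, whether a
-- resource pattern r targets map key k, and whether any enforced_for resource targets k
def pvPfx (r : String) : String := ((PySem.Str.split? r ":").getD []).headD ""
def pvHit (resource_map : List (String × List (String × List (String × List (String × String))))) (k r : String) : Bool :=
  ((PySem.Dict.mk resource_map).contains r && r == k) ||
  (!(PySem.Dict.mk resource_map).contains r && PySem.Str.endswith r ":*" && PySem.Str.startswith k (pvPfx r))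
def pvTouched (tag_statement : List (String × List (String × List String))) (resource_map : List (String × List (String × List (String × List (String × String))))) (k : String) : Bool :=
  ["@@assign", "@@append"].any (fun io =>
    ((PySem.Dict.mk (((PySem.Dict.mk tag_statement).get? "enforced_for").getD [])).getD io []).any
      (fun r => pvHit resource_map k r))

-- Pre_ excludes exactly the inputs where the Python A raises: a tag_statement without an
-- "enforced_for" key (KeyError), and a targeted map entry whose existing "Condition" dict has
-- no "Null" key (KeyError); it also excludes association lists with duplicate resource-map
-- keys, which do not represent any Python dict.
def Pre_add_tag_conditions_to_resource_map (tag_name : String) (tag_statement : List (String × List (String × List String))) (resource_map : List (String × List (String × List (String × List (String × String))))) : Prop :=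
  (PySem.Dict.mk tag_statement).contains "enforced_for" = true ∧
  (resource_map.map Prod.fst).Nodup ∧
  ∀ p ∈ resource_map, pvTouched tag_statement resource_map p.1 = true →
    (((PySem.Dict.mk p.2).get? "Condition").all (fun c => (PySem.Dict.mk c).contains "Null")) = true
instance (tag_name : String) (tag_statement : List (String × List (String × List String))) (resource_map : List (String × List (String × List (String × List (String × String))))) : Decidable (Pre_add_tag_conditions_to_resource_map tag_name tag_statement resource_map) := by unfold Pre_add_tag_conditions_to_resource_map; infer_instance

def pvWitness_add_tag_conditions_to_resource_map : String × (List (String × List (String × List String))) × (List (String × List (String × List (String × List (String × String))))) :=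
  ("CostCenter", [("enforced_for", [("@@assign", ["ec2:*"])])], [("ec2:RunInstances", [])])

def Spec_add_tag_conditions_to_resource_map (tag_name : String) (tag_statement : List (String × List (String × List String))) (resource_map : List (String × List (String × List (String × List (String × String))))) (out : List (String × List (String × List (String × List (String × String))))) : Prop := out = add_tag_conditions_to_resource_map_alt tag_name tag_statement resource_map
instance (tag_name : String) (tag_statement : List (String × List (String × List String))) (resource_map : List (String × List (String × List (String × List (String × String))))) (out : List (String × List (String × List (String × List (String × String))))) : Decidable (Spec_add_tag_conditions_to_resource_map tag_name tag_statement resource_map out) := by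
  unfold Spec_add_tag_conditions_to_resource_map
  letI : DecidableEq (List (String × String)) := inferInstance
  letI : DecidableEq (List (String × List (String × String))) := inferInstance
  letI : DecidableEq (List (String × List (String × List (String × String)))) := inferInstance
  letI : DecidableEq (List (String × List (String × List (String × List (String × String))))) := inferInstance
  infer_instance

-- ===== CLAIM (what is proved, stated in full; the proofs are below) =====
def Claim_equal_add_tag_conditions_to_resource_map : Prop := ∀ (tag_name : String) (tag_statement : List (String × List (String × List String))) (resource_map : List (String × List (String × List (String × List (String × String))))), Dom_add_tag_conditions_to_resource_map tag_name tag_statement resource_map → Pre_add_tag_conditions_to_resource_map tag_name tag_statement resource_map → Spec_add_tag_conditions_to_resource_map tag_name tag_statement resource_map (add_tag_conditions_to_resource_map tag_name tag_statement resource_map)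


-- ===== LEMMAS AND PROOFS =====
theorem pv_witness_ok : Dom_add_tag_conditions_to_resource_map pvWitness_add_tag_conditions_to_resource_map.1 pvWitness_add_tag_conditions_to_resource_map.2.1 pvWitness_add_tag_conditions_to_resource_map.2.2 ∧ Pre_add_tag_conditions_to_resource_map pvWitness_add_tag_conditions_to_resource_map.1 pvWitness_add_tag_conditions_to_resource_map.2.1 pvWitness_add_tag_conditions_to_resource_map.2.2 := by decide

-- applying the per-entry mutation f to the entries whose key satisfies pred
def pvTouch (f : PvEntry → PvEntry) (pred : String → Bool) (l : List (String × PvEntry)) : List (String × PvEntry) :=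
  l.map (fun p => if pred p.1 then (p.1, f p.2) else p)

theorem pvTouch_false (f : PvEntry → PvEntry) (l : List (String × PvEntry)) :
    pvTouch f (fun _ => false) l = l := by simp [pvTouch]

theorem pvTouch_congr (f : PvEntry → PvEntry) {q1 q2 : String → Bool} {l : List (String × PvEntry)}
    (h : ∀ p ∈ l, q1 p.1 = q2 p.1) : pvTouch f q1 l = pvTouch f q2 l := by
  unfold pvTouch
  exact List.map_congr_left (fun p hp => by rw [h p hp])

theorem pvTouch_fst (f : PvEntry → PvEntry) (pred : String → Bool) (l : List (String × PvEntry)) :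
    (pvTouch f pred l).map Prod.fst = l.map Prod.fst := by
  unfold pvTouch
  rw [List.map_map]
  exact List.map_congr_left (fun p hp => by by_cases h : pred p.1 <;> simp [h])

theorem pvTouch_comp (f : PvEntry → PvEntry) (hf : ∀ e, f (f e) = f e) (q1 q2 : String → Bool)
    (l : List (String × PvEntry)) :
    pvTouch f q2 (pvTouch f q1 l) = pvTouch f (fun k => q1 k || q2 k) l := by
  unfold pvTouch
  rw [List.map_map]
  apply List.map_congr_left
  intro p hp
  by_cases h1 : q1 p.1 <;> by_cases h2 : q2 p.1 <;> simp [h1, h2, hf]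

-- the inner modification of the "Condition" value
def pvG (ck : String) (c : List (String × List (String × String))) : List (String × List (String × String)) :=
  ((PySem.Dict.mk c).modify "Null" [] (fun n => ((PySem.Dict.mk n).insert ck "true").items)).items

theorem pvG_idem (ck : String) (c : List (String × List (String × String))) :
    pvG ck (pvG ck c) = pvG ck c := by
  unfold pvG
  simp only [PySem.Dict.modify]
  show (((PySem.Dict.mk c).insert "Null" _).insert "Null"
    ((PySem.Dict.mk ((((PySem.Dict.mk c).insert "Null" _).getD "Null" []))).insert ck "true").items).items = _
  rw [PySem.Dict.getD_insert_self, PySem.Dict.insert_insert_self]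
  show ((PySem.Dict.mk c).insert "Null"
    (((PySem.Dict.mk (((PySem.Dict.mk _).insert ck "true").items)).insert ck "true").items)).items = _
  rw [show (PySem.Dict.mk (((PySem.Dict.mk ((PySem.Dict.mk c).getD "Null" [])).insert ck "true").items))
        = (PySem.Dict.mk ((PySem.Dict.mk c).getD "Null" [])).insert ck "true" from rfl,
      PySem.Dict.insert_insert_self]

-- A's mutation block in closed form
def pvD1 (e : PvEntry) : PySem.Dict String (List (String × List (String × String))) :=
  if (PySem.Dict.mk e).contains "Condition" then PySem.Dict.mk e
  else (PySem.Dict.mk e).insert "Condition" [("Null", [])]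

theorem pvA_touch_def (t : String) (e : PvEntry) :
    pvA_touch t e
      = ((pvD1 e).insert "Condition" (pvG ("aws:RequestTag/" ++ t) ((pvD1 e).getD "Condition" []))).items := rfl

theorem pvA_touch_idem (t : String) (e : PvEntry) : pvA_touch t (pvA_touch t e) = pvA_touch t e := by
  have hr := pvA_touch_def t e
  have hcont : (PySem.Dict.mk (pvA_touch t e)).contains "Condition" = true := by
    rw [hr]
    exact PySem.Dict.contains_insert_self _ _ _
  have h1a : pvD1 (pvA_touch t e) = PySem.Dict.mk (pvA_touch t e) := by
    unfold pvD1
    rw [hcont]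
    simp
  have h1 : pvD1 (pvA_touch t e)
      = (pvD1 e).insert "Condition" (pvG ("aws:RequestTag/" ++ t) ((pvD1 e).getD "Condition" [])) := by
    rw [h1a, hr]
  calc pvA_touch t (pvA_touch t e)
      = ((pvD1 (pvA_touch t e)).insert "Condition"
          (pvG ("aws:RequestTag/" ++ t) ((pvD1 (pvA_touch t e)).getD "Condition" []))).items :=
        pvA_touch_def t (pvA_touch t e)
    _ = (((pvD1 e).insert "Condition" (pvG ("aws:RequestTag/" ++ t) ((pvD1 e).getD "Condition" []))).insert
          "Condition" (pvG ("aws:RequestTag/" ++ t)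
            (pvG ("aws:RequestTag/" ++ t) ((pvD1 e).getD "Condition" [])))).items := by
        rw [h1, PySem.Dict.getD_insert_self]
    _ = ((pvD1 e).insert "Condition"
          (pvG ("aws:RequestTag/" ++ t) (pvG ("aws:RequestTag/" ++ t) ((pvD1 e).getD "Condition" [])))).items := by
        rw [PySem.Dict.insert_insert_self]
    _ = pvA_touch t e := by rw [pvG_idem]; exact hr.symm

-- B's shared mutation is exactly A's mutation block
theorem pvB_setNull_eq (t : String) (e : PvEntry) :
    pvB_setNull ("aws:RequestTag/" ++ t) e = pvA_touch t e := by
  unfold pvB_setNull pvA_touch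
  by_cases hc : (PySem.Dict.mk e).contains "Condition" = true
  · simp [PySem.Dict.setdefault, hc]
  · simp [PySem.Dict.setdefault, hc, PySem.Dict.insert]

-- a single `modify` at a present key, with unique keys, is pvTouch at that key
theorem pv_modify_items (d : PySem.Dict String PvEntry) (k : String) (f : PvEntry → PvEntry)
    (hnd : d.keys.Nodup) (hc : d.contains k = true) :
    (d.modify k [] f).items = pvTouch f (fun k' => k' == k) d.items := by
  simp only [PySem.Dict.modify, PySem.Dict.insert, hc, if_true]
  unfold pvTouch
  apply List.map_congr_left
  intro p hp
  by_cases h : (p.1 == k) = true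
  · have hk : p.1 = k := eq_of_beq h
    have hg : d.getD k [] = p.2 := by
      have : (k, p.2) ∈ d.items := by rw [← hk]; exact hp
      exact PySem.Dict.getD_of_mem_items _ this hnd []
    simp [hk, hg]
  · simp [h]

theorem pv_keys_of_items {m : PySem.Dict String PvEntry} {f : PvEntry → PvEntry} {pred : String → Bool}
    {rm : List (String × PvEntry)} (hm : m.items = pvTouch f pred rm) : m.keys = rm.map Prod.fst := by
  have h0 : m.keys = m.items.map Prod.fst := rfl
  rw [h0, hm, pvTouch_fst]

theorem pv_contains_of_items {m : PySem.Dict String PvEntry} {f : PvEntry → PvEntry} {pred : String → Bool}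
    {rm : List (String × PvEntry)} (hm : m.items = pvTouch f pred rm) (r : String) :
    m.contains r = (PySem.Dict.mk rm).contains r := by
  show m.items.any (fun p => p.1 == r) = rm.any (fun p => p.1 == r)
  rw [hm]
  unfold pvTouch
  rw [List.any_map]
  apply PySem.List.any_congr_mem
  intro p hp
  by_cases h : pred p.1 <;> simp [h, Function.comp]

theorem pv_any_fst_iff (rm : List (String × PvEntry)) (r : String) :
    (PySem.Dict.mk rm).contains r = true ↔ r ∈ rm.map Prod.fst := by
  show rm.any (fun p => p.1 == r) = true ↔ _
  simp [List.any_eq_true, List.mem_map]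

-- the wildcard inner loop
theorem pv_wild_fold (t : String) (rm : List (String × PvEntry)) (hnd : (rm.map Prod.fst).Nodup) :
    ∀ (ks : List String) (q : String → Bool) (m : PySem.Dict String PvEntry),
      (∀ k ∈ ks, k ∈ rm.map Prod.fst) → m.items = pvTouch (pvA_touch t) q rm →
      (ks.foldl (fun m w => m.modify w [] (pvA_touch t)) m).items
        = pvTouch (pvA_touch t) (fun k => q k || ks.contains k) rm := by
  intro ks
  induction ks with
  | nil =>
    intro q m _ hm
    simp only [List.foldl_nil]
    refine hm.trans (pvTouch_congr _ (fun p _ => by simp))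
  | cons a ks ih =>
    intro q m hks hm
    simp only [List.foldl_cons]
    have hcm : m.contains a = true := by
      rw [pv_contains_of_items hm]
      exact (pv_any_fst_iff rm a).mpr (hks a (by simp))
    have hknd : m.keys.Nodup := by rw [pv_keys_of_items hm]; exact hnd
    have hm' : (m.modify a [] (pvA_touch t)).items
        = pvTouch (pvA_touch t) (fun k => q k || (k == a)) rm := by
      rw [pv_modify_items _ _ _ hknd hcm, hm, pvTouch_comp _ (pvA_touch_idem t)]
    rw [ih (fun k => q k || (k == a)) _ (fun k hk => hks k (by simp [hk])) hm']
    apply pvTouch_congr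
    intro p _
    by_cases h : p.1 = a
    · simp [h]
    · have hb : (p.1 == a) = false := beq_eq_false_iff_ne.mpr h
      simp [h, hb]

-- A's loop over one enforced_for resource list
theorem pv_inner_fold (t : String) (rm : List (String × PvEntry)) (hnd : (rm.map Prod.fst).Nodup) :
    ∀ (rlist : List String) (q : String → Bool) (m : PySem.Dict String PvEntry),
      m.items = pvTouch (pvA_touch t) q rm →
      (rlist.foldl (fun m resource =>
        if m.contains resource then
          m.modify resource [] (pvA_touch t)
        else if PySem.Str.endswith resource ":*" then
          (m.keys.filter (fun w => PySem.Str.startswith w (((PySem.Str.split? resource ":").getD []).headD ""))).foldl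
            (fun m w => m.modify w [] (pvA_touch t)) m
        else m) m).items
      = pvTouch (pvA_touch t) (fun k => q k || rlist.any (fun r => pvHit rm k r)) rm := by
  intro rlist
  induction rlist with
  | nil =>
    intro q m hm
    simp only [List.foldl_nil]
    refine hm.trans (pvTouch_congr _ (fun p _ => by simp))
  | cons r rs ih =>
    intro q m hm
    simp only [List.foldl_cons]
    have hcr : m.contains r = (PySem.Dict.mk rm).contains r := pv_contains_of_items hm r
    by_cases h1 : (PySem.Dict.mk rm).contains r = true
    · rw [if_pos (hcr.trans h1)]
      have hknd : m.keys.Nodup := by rw [pv_keys_of_items hm]; exact hnd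
      have hm' : (m.modify r [] (pvA_touch t)).items
          = pvTouch (pvA_touch t) (fun k => q k || (k == r)) rm := by
        rw [pv_modify_items _ _ _ hknd (hcr.trans h1), hm, pvTouch_comp _ (pvA_touch_idem t)]
      rw [ih (fun k => q k || (k == r)) _ hm']
      apply pvTouch_congr
      intro p _
      have hb : (p.1 == r) = (r == p.1) := by
        by_cases h : p.1 = r <;> simp [h, Ne.symm, eq_comm]
      have hhit : pvHit rm p.1 r = (r == p.1) := by
        simp only [pvHit, h1, Bool.true_and, Bool.not_true, Bool.false_and, Bool.or_false]
      rw [List.any_cons, hhit, hb, Bool.or_assoc]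
    · have hcf : ¬ (m.contains r = true) := fun hh => h1 (hcr.symm.trans hh)
      rw [if_neg hcf]
      by_cases h2 : PySem.Str.endswith r ":*" = true
      · rw [if_pos h2]
        have hkeys : m.keys = rm.map Prod.fst := pv_keys_of_items hm
        have hsub : ∀ k ∈ m.keys.filter
            (fun w => PySem.Str.startswith w (((PySem.Str.split? r ":").getD []).headD "")),
            k ∈ rm.map Prod.fst := by
          intro k hk
          rw [← hkeys]
          exact (List.mem_filter.mp hk).1
        have hw := pv_wild_fold t rm hnd _ q m hsub hm
        rw [ih _ _ hw]
        apply pvTouch_congr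
        intro p hp
        have hmem : p.1 ∈ rm.map Prod.fst := List.mem_map_of_mem hp
        have h1f : (PySem.Dict.mk rm).contains r = false := Bool.not_eq_true _ ▸ h1
        have hcont : (m.keys.filter
            (fun w => PySem.Str.startswith w (((PySem.Str.split? r ":").getD []).headD ""))).contains p.1
            = PySem.Str.startswith p.1 (((PySem.Str.split? r ":").getD []).headD "") := by
          rw [hkeys]
          by_cases hs : PySem.Str.startswith p.1 (((PySem.Str.split? r ":").getD []).headD "") = true
          · rw [hs]
            exact List.contains_iff_mem.mpr (List.mem_filter.mpr ⟨hmem, hs⟩)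
          · rw [Bool.not_eq_true] at hs
            rw [hs]
            rw [Bool.eq_false_iff]
            intro hc
            have := (List.mem_filter.mp (List.contains_iff_mem.mp hc)).2
            rw [hs] at this
            exact Bool.false_ne_true this
        rw [List.any_cons, hcont]
        have hhit : pvHit rm p.1 r = PySem.Str.startswith p.1 (pvPfx r) := by
          simp only [pvHit, h1f, h2, Bool.false_and, Bool.false_or, Bool.not_false, Bool.true_and]
        rw [hhit]
        simp only [pvPfx, Bool.or_assoc]
      · rw [if_neg h2]
        rw [ih q m hm]
        apply pvTouch_congr
        intro p _
        have h1f : (PySem.Dict.mk rm).contains r = false := Bool.not_eq_true _ ▸ h1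
        have h2f : PySem.Str.endswith r ":*" = false := Bool.not_eq_true _ ▸ h2
        have hhit : pvHit rm p.1 r = false := by
          simp only [pvHit, h1f, h2f, Bool.false_and, Bool.false_or, Bool.not_false,
            Bool.and_false]
        rw [List.any_cons, hhit]
        simp

-- all enforced_for resources of both inheritance operators, in processing order
def pvRL (ts : List (String × List (String × List String))) : List String :=
  ["@@assign", "@@append"].flatMap
    (fun io => (PySem.Dict.mk (((PySem.Dict.mk ts).get? "enforced_for").getD [])).getD io [])

-- port A computes pvTouch with the pvTouched predicate
theorem pv_A_items (t : String) (ts : List (String × List (String × List String)))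
    (rm : List (String × PvEntry)) (hnd : (rm.map Prod.fst).Nodup) :
    add_tag_conditions_to_resource_map t ts rm = pvTouch (pvA_touch t) (pvTouched ts rm) rm := by
  unfold add_tag_conditions_to_resource_map
  simp only [List.foldl_cons, List.foldl_nil]
  have hstep : ∀ (io : String) (q : String → Bool) (m : PySem.Dict String PvEntry),
      m.items = pvTouch (pvA_touch t) q rm →
      ((if (PySem.Dict.mk (((PySem.Dict.mk ts).get? "enforced_for").getD [])).contains io = true then
          (((PySem.Dict.mk (((PySem.Dict.mk ts).get? "enforced_for").getD [])).get? io).getD []).foldl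
            (fun m resource =>
              if m.contains resource then
                m.modify resource [] (pvA_touch t)
              else if PySem.Str.endswith resource ":*" then
                (m.keys.filter (fun w => PySem.Str.startswith w (((PySem.Str.split? resource ":").getD []).headD ""))).foldl
                  (fun m w => m.modify w [] (pvA_touch t)) m
              else m) m
        else m)).items
      = pvTouch (pvA_touch t)
          (fun k => q k ||
            ((PySem.Dict.mk (((PySem.Dict.mk ts).get? "enforced_for").getD [])).getD io []).any
              (fun r => pvHit rm k r)) rm := by
    intro io q m hm
    by_cases hio : (PySem.Dict.mk (((PySem.Dict.mk ts).get? "enforced_for").getD [])).contains io = true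
    · rw [if_pos hio, pv_inner_fold t rm hnd _ q m hm]
      rfl
    · rw [if_neg hio]
      have h0 : (PySem.Dict.mk (((PySem.Dict.mk ts).get? "enforced_for").getD [])).getD io [] = [] :=
        PySem.Dict.getD_of_not_contains _ _ (Bool.not_eq_true _ ▸ hio)
      simp only [h0, List.any_nil, Bool.or_false]
      exact hm
  have h0 : (PySem.Dict.mk rm).items = pvTouch (pvA_touch t) (fun _ => false) rm :=
    (pvTouch_false _ _).symm
  have h1 := hstep "@@assign" (fun _ => false) (PySem.Dict.mk rm) h0
  have h2 := hstep "@@append" _ _ h1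
  rw [h2]
  refine pvTouch_congr _ (fun p _ => ?_)
  simp [pvTouched, List.any_cons, List.any_nil]

-- B's first pass in closed form: exact-match keys and wildcard prefixes
theorem pv_collected (ts : List (String × List (String × List String)))
    (rm : List (String × PvEntry)) :
    (["@@assign", "@@append"].foldl (fun (acc : PySem.Set String × List String) io =>
        ((PySem.Dict.mk (((PySem.Dict.mk ts).get? "enforced_for").getD [])).getD io []).foldl
          (fun (acc : PySem.Set String × List String) resource =>
            if (PySem.Dict.mk rm).contains resource then (PySem.Set.add acc.1 resource, acc.2)
            else if PySem.Str.endswith resource ":*" then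
              (acc.1, acc.2 ++ [((PySem.Str.split? resource ":").getD []).headD ""])
            else acc) acc) (PySem.Set.empty, []))
    = (PySem.Set.ofList ((pvRL ts).filter (fun r => (PySem.Dict.mk rm).contains r)),
       ((pvRL ts).filter (fun r => !(PySem.Dict.mk rm).contains r && PySem.Str.endswith r ":*")).map
         (fun r => ((PySem.Str.split? r ":").getD []).headD "")) := by
  have hflat : ∀ (g : (PySem.Set String × List String) → String → (PySem.Set String × List String))
      (init : PySem.Set String × List String),
      (["@@assign", "@@append"].foldl (fun acc io =>
        ((PySem.Dict.mk (((PySem.Dict.mk ts).get? "enforced_for").getD [])).getD io []).foldl g acc) init)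
      = (pvRL ts).foldl g init := by
    intro g init
    unfold pvRL
    rw [List.flatMap_def, List.foldl_flatten, List.foldl_map]
  rw [hflat]
  have hsplit : (fun (acc : PySem.Set String × List String) (resource : String) =>
      if (PySem.Dict.mk rm).contains resource then (PySem.Set.add acc.1 resource, acc.2)
      else if PySem.Str.endswith resource ":*" then
        (acc.1, acc.2 ++ [((PySem.Str.split? resource ":").getD []).headD ""])
      else acc)
    = (fun acc resource =>
        ((if (PySem.Dict.mk rm).contains resource then PySem.Set.add acc.1 resource else acc.1),
         (if !(PySem.Dict.mk rm).contains resource && PySem.Str.endswith resource ":*" then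
            acc.2 ++ [((PySem.Str.split? resource ":").getD []).headD ""] else acc.2))) := by
    funext acc resource
    cases hc1 : (PySem.Dict.mk rm).contains resource <;>
      cases hc2 : PySem.Str.endswith resource ":*" <;> simp
  rw [hsplit]
  rw [PySem.List.foldl_prod_mk
    (f := fun s resource => if (PySem.Dict.mk rm).contains resource then PySem.Set.add s resource else s)
    (g := fun l resource => if !(PySem.Dict.mk rm).contains resource && PySem.Str.endswith resource ":*" then
      l ++ [((PySem.Str.split? resource ":").getD []).headD ""] else l)]
  rw [PySem.List.foldl_if_eq_foldl_filter, PySem.List.foldl_append_if]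
  rfl

-- the predicate B sweeps with equals pvTouched
theorem pv_pred_eq (ts : List (String × List (String × List String)))
    (rm : List (String × PvEntry)) (k : String) :
    (PySem.Set.contains (PySem.Set.ofList ((pvRL ts).filter (fun r => (PySem.Dict.mk rm).contains r))) k
      || (((pvRL ts).filter (fun r => !(PySem.Dict.mk rm).contains r && PySem.Str.endswith r ":*")).map
           (fun r => ((PySem.Str.split? r ":").getD []).headD "")).any
          (fun q => PySem.Str.startswith k q))
    = pvTouched ts rm k := by
  have hT : pvTouched ts rm k = (pvRL ts).any (fun r => pvHit rm k r) := by
    unfold pvTouched pvRL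
    rw [List.any_flatMap]
  rw [hT, Bool.eq_iff_iff]
  constructor
  · intro h
    rcases Bool.or_eq_true_iff.mp h with h | h
    · have hk : k ∈ (pvRL ts).filter (fun r => (PySem.Dict.mk rm).contains r) :=
        (PySem.Set.mem_ofList _ _).mp (List.contains_iff_mem.mp h)
      rcases List.mem_filter.mp hk with ⟨hmem, hc1⟩
      refine List.any_eq_true.mpr ⟨k, hmem, ?_⟩
      simp [pvHit, hc1]
    · rcases List.any_eq_true.mp h with ⟨pfx, hpfx, hsw⟩
      rcases List.mem_map.mp hpfx with ⟨r, hrf, hre⟩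
      rcases List.mem_filter.mp hrf with ⟨hmem, hc2⟩
      refine List.any_eq_true.mpr ⟨r, hmem, ?_⟩
      subst hre
      have hy : (!(PySem.Dict.mk rm).contains r && PySem.Str.endswith r ":*"
          && PySem.Str.startswith k (pvPfx r)) = true := by
        rw [hc2, Bool.true_and]
        exact hsw
      simp only [pvHit]
      rw [hy, Bool.or_true]
  · intro h
    rcases List.any_eq_true.mp h with ⟨r, hmem, hr⟩
    rcases Bool.or_eq_true_iff.mp hr with hr | hr
    · rcases Bool.and_eq_true_iff.mp hr with ⟨hc1, hrk⟩
      have : r = k := eq_of_beq hrk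
      subst this
      refine Bool.or_eq_true_iff.mpr (Or.inl ?_)
      exact List.contains_iff_mem.mpr ((PySem.Set.mem_ofList _ _).mpr
        (List.mem_filter.mpr ⟨hmem, hc1⟩))
    · rcases Bool.and_eq_true_iff.mp hr with ⟨hc, hsw⟩
      rcases Bool.and_eq_true_iff.mp hc with ⟨hnc, hew⟩
      refine Bool.or_eq_true_iff.mpr (Or.inr ?_)
      refine List.any_eq_true.mpr ⟨pvPfx r, ?_, hsw⟩
      exact List.mem_map.mpr ⟨r, List.mem_filter.mpr ⟨hmem, hc⟩, rfl⟩

-- port B computes the same pvTouch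
theorem pv_B_items (t : String) (ts : List (String × List (String × List String)))
    (rm : List (String × PvEntry)) :
    add_tag_conditions_to_resource_map_alt t ts rm = pvTouch (pvA_touch t) (pvTouched ts rm) rm := by
  unfold add_tag_conditions_to_resource_map_alt
  simp only [pv_collected ts rm]
  calc rm.map (fun p =>
        if PySem.Set.contains (PySem.Set.ofList ((pvRL ts).filter (fun r => (PySem.Dict.mk rm).contains r))) p.1
            || (((pvRL ts).filter (fun r => !(PySem.Dict.mk rm).contains r && PySem.Str.endswith r ":*")).map
                 (fun r => ((PySem.Str.split? r ":").getD []).headD "")).any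
                (fun q => PySem.Str.startswith p.1 q) then
          (p.1, pvB_setNull ("aws:RequestTag/" ++ t) p.2)
        else p)
      = pvTouch (pvB_setNull ("aws:RequestTag/" ++ t))
          (fun k =>
            PySem.Set.contains (PySem.Set.ofList ((pvRL ts).filter (fun r => (PySem.Dict.mk rm).contains r))) k
              || (((pvRL ts).filter (fun r => !(PySem.Dict.mk rm).contains r && PySem.Str.endswith r ":*")).map
                   (fun r => ((PySem.Str.split? r ":").getD []).headD "")).any
                  (fun q => PySem.Str.startswith k q)) rm := rfl
    _ = pvTouch (pvA_touch t) _ rm := by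
        rw [show pvB_setNull ("aws:RequestTag/" ++ t) = pvA_touch t from funext (pvB_setNull_eq t)]
    _ = pvTouch (pvA_touch t) (pvTouched ts rm) rm :=
        pvTouch_congr _ (fun p _ => pv_pred_eq ts rm p.1)

-- ===== VERDICT (by name: the statement is the Claim_ definition above) =====
theorem add_tag_conditions_to_resource_map_spec : Claim_equal_add_tag_conditions_to_resource_map := by
  intro tag_name tag_statement resource_map _ hpre
  unfold Spec_add_tag_conditions_to_resource_map
  rw [pv_A_items tag_name tag_statement resource_map hpre.2.1,
    pv_B_items tag_name tag_statement resource_map]
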